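-- pv_equiv track=rewrite | github.com/SW9-10-AAU/ETL | src/duckdb_transform_ls_to_cs.py | calculate_exit_timestamps
-- ===== SOURCE A (Python) =====
-- def calculate_exit_timestamps(
--     cells_with_ts: list[tuple[int, int]], ts_end: int
-- ) -> list[int]:
--     if not cells_with_ts:
--         return []
--
--     exit_timestamps: list[int] = []
--     for idx, (_, entry_ts) in enumerate(cells_with_ts):
--         if idx + 1 < len(cells_with_ts):
--             exit_ts = cells_with_ts[idx + 1][1]
--         else:
--             exit_ts = ts_end  # Use trajectory end time for the last cell
--
--         # Ensure exit_ts >= entry_ts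
--         exit_timestamps.append(max(int(entry_ts), int(exit_ts)))
--
--     return exit_timestamps
-- ===== SOURCE B (Python) =====
-- def calculate_exit_timestamps(
--     cells_with_ts: list[tuple[int, int]], ts_end: int
-- ) -> list[int]:
--     # Backward pass: walk the cells from last to first, carrying the entry
--     # timestamp of the cell just processed as the current cell's exit time
--     # (the last cell exits at ts_end), then reverse the collected output.
--     out: list[int] = []
--     nxt = int(ts_end)
--     for _, entry_ts in reversed(cells_with_ts):
--         e = int(entry_ts)
--         out.append(max(e, nxt))
--         nxt = e
--     out.reverse()
--     return out
-- ===== Notes on version B (the rewrite author's own statement) =====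
-- stated objective: alternative
-- what changed: Replaces A's forward indexed loop with its idx+1 lookahead and bounds branch by a single backward traversal that carries the previously-processed entry timestamp as an accumulator (the next cell's entry), appending results and reversing once at the end; no indexing, no length check, no empty-list special case.
import Mathlib
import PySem

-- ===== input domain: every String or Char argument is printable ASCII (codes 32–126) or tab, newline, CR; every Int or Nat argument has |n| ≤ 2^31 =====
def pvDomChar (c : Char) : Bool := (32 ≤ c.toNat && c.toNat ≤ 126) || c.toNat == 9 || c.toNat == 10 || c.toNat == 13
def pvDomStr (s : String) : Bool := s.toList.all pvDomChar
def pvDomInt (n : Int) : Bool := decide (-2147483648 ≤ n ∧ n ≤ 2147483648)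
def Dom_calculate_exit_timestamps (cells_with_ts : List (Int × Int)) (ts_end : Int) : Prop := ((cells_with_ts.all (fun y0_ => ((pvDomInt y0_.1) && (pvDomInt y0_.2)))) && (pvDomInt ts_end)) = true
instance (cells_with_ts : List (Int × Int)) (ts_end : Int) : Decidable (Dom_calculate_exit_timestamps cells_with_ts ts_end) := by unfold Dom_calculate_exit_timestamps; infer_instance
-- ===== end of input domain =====

-- B replaces A's forward indexed loop (idx+1 lookahead with a bounds branch) by a single backward traversal carrying the previously-processed entry timestamp as an accumulator (alternative; same value everywhere).


-- ===== PORT A =====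
-- Port of A: early return on empty, then an indexed loop with an idx+1 bounds branch,
-- appending max(entry, exit) to the accumulator. int() on an int is the identity.
def calculate_exit_timestamps (cells_with_ts : List (Int × Int)) (ts_end : Int) : List Int :=
  if cells_with_ts = [] then []
  else
    (PySem.List.enumerate cells_with_ts 0).foldl
      (fun exit_timestamps p =>
        let exit_ts : Int :=
          if p.1 + 1 < (cells_with_ts.length : Int) then
            ((PySem.List.pyGet? cells_with_ts (p.1 + 1)).getD (0, 0)).2
          else ts_end
        exit_timestamps ++ [max p.2.2 exit_ts]) []

-- ===== PORT B =====
-- Port of B: fold over the reversed list carrying (out, nxt); append max(e, nxt),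
-- update nxt := e; finally reverse the collected output.
def calculate_exit_timestamps_alt (cells_with_ts : List (Int × Int)) (ts_end : Int) : List Int :=
  let st := cells_with_ts.reverse.foldl
    (fun (st : List Int × Int) p => (st.1 ++ [max p.2 st.2], p.2)) ([], ts_end)
  st.1.reverse

-- ===== PRECONDITION & SPEC =====
def Spec_calculate_exit_timestamps (cells_with_ts : List (Int × Int)) (ts_end : Int) (out : List Int) : Prop := out = calculate_exit_timestamps_alt cells_with_ts ts_end
instance (cells_with_ts : List (Int × Int)) (ts_end : Int) (out : List Int) : Decidable (Spec_calculate_exit_timestamps cells_with_ts ts_end out) := by unfold Spec_calculate_exit_timestamps; infer_instance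

-- ===== CLAIM (what is proved, stated in full; the proofs are below) =====
def Claim_equal_calculate_exit_timestamps : Prop := ∀ (cells_with_ts : List (Int × Int)) (ts_end : Int), Dom_calculate_exit_timestamps cells_with_ts ts_end → Spec_calculate_exit_timestamps cells_with_ts ts_end (calculate_exit_timestamps cells_with_ts ts_end)

-- ===== LEMMAS AND PROOFS =====

-- Reference recursion: exit of each cell = max(entry, entry of next cell or ts_end).
def pvRef (ts : Int) : List (Int × Int) → List Int
  | [] => []
  | (_, e) :: rest =>
      (match rest with
       | [] => max e ts
       | (_, e') :: _ => max e e') :: pvRef ts rest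

theorem pvRef_length (ts : Int) (xs : List (Int × Int)) : (pvRef ts xs).length = xs.length := by
  induction xs with
  | nil => rfl
  | cons x xs ih => cases x; simp [pvRef, ih]

theorem pvRef_getElem (ts : Int) (xs : List (Int × Int)) (i : Nat) (h : i < xs.length) :
    (pvRef ts xs)[i]'(by rw [pvRef_length]; exact h) =
      max (xs[i].2) (if h' : i + 1 < xs.length then (xs[i+1]'h').2 else ts) := by
  induction xs generalizing i with
  | nil => simp at h
  | cons x xs ih =>
    obtain ⟨a, e⟩ := x
    cases i with
    | zero =>
      cases xs with
      | nil => simp [pvRef]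
      | cons y ys => cases y; simp [pvRef]
    | succ j =>
      have hj : j < xs.length := by simpa using h
      have := ih j hj
      simp only [pvRef, List.getElem_cons_succ]
      rw [this]
      congr 1
      by_cases hb : j + 1 < xs.length
      · rw [dif_pos hb, dif_pos (by simpa using Nat.succ_lt_succ hb)]
      · rw [dif_neg hb, dif_neg (by simp; omega)]

-- The backward fold's invariant: out.reverse is pvRef, nxt is the first entry (or ts).
theorem pvB_invariant (ts : Int) (xs : List (Int × Int)) :
    (xs.reverse.foldl (fun (st : List Int × Int) p => (st.1 ++ [max p.2 st.2], p.2)) ([], ts))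
      = ((pvRef ts xs).reverse, match xs with | [] => ts | (_, e) :: _ => e) := by
  induction xs with
  | nil => rfl
  | cons x xs ih =>
    obtain ⟨a, e⟩ := x
    rw [List.reverse_cons, List.foldl_append, ih]
    cases xs with
    | nil => simp [pvRef]
    | cons y ys => cases y; simp [pvRef]

theorem pvB_eq_ref (xs : List (Int × Int)) (ts : Int) :
    calculate_exit_timestamps_alt xs ts = pvRef ts xs := by
  unfold calculate_exit_timestamps_alt
  rw [pvB_invariant]
  simp

-- A's indexed loop computes the same elementwise values as pvRef.
theorem pvA_eq_ref (xs : List (Int × Int)) (ts : Int) :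
    calculate_exit_timestamps xs ts = pvRef ts xs := by
  cases xs with
  | nil => rfl
  | cons x xs =>
    simp only [calculate_exit_timestamps, if_neg (List.cons_ne_nil x xs),
      PySem.List.foldl_append_singleton_eq_map, List.nil_append]
    apply List.ext_getElem
    · simp [PySem.List.length_enumerate, pvRef_length]
    · intro i h1 h2
      simp only [List.length_map, PySem.List.length_enumerate] at h1
      rw [pvRef_getElem ts (x :: xs) i h1]
      simp only [List.getElem_map, PySem.List.getElem_enumerate]
      congr 1
      by_cases hi : i + 1 < (x :: xs).length
      · rw [if_pos (by simp at hi ⊢; omega), dif_pos hi]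
        have hcast : (0 : Int) + (i : Int) + 1 = ((i + 1 : Nat) : Int) := by push_cast; ring
        rw [hcast, PySem.List.pyGet?_natCast, List.getElem?_eq_getElem hi]
        rfl
      · rw [if_neg (by simp at hi ⊢; omega), dif_neg hi]

-- ===== VERDICT (by name: the statement is the Claim_ definition above) =====
theorem calculate_exit_timestamps_spec : Claim_equal_calculate_exit_timestamps := by
  intro xs ts _
  unfold Spec_calculate_exit_timestamps
  rw [pvA_eq_ref, pvB_eq_ref]
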